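-- pv_equiv track=rewrite | github.com/junstat/JavaLearning | NowCoder/src/huawei/HJ024/main.py | inc_max
-- ===== SOURCE A (Python) =====
-- import bisect  # 引入二分法
--
-- def inc_max(l):  # 定义一个函数，寻找最长的子序列
--     arr = [l[0]]  # 定义列表，将传入函数的列表第一个元素放入当前元素
--     dp = [1] * len(l)  # 定义一个列表，默认子序列有当前元素1，长度是传入函数的列表长度
--     for i in range(1, len(l)):  # 从第二个元素开始查找
--         if l[i] > arr[-1]:  # 如果元素大于arr列表的最后一个元素，就把它插入列表末尾
--             arr.append(l[i])
--             dp[i] = len(arr)  # 获取这个元素子序列的长度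
--         else:  # 否则，利用二分法找到比元素大的元素的位置，用新的元素替代比它大的那个元素的值，这样就能制造出一个顺序排列的子序列
--             pos = bisect.bisect_left(arr, l[i])
--             arr[pos] = l[i]
--             dp[i] = pos + 1  # 获取这个元素子序列的长度
--     return dp
-- ===== SOURCE B (Python) =====
-- def inc_max(l):
--     # Textbook O(n^2) DP: dp[i] = length of the longest strictly increasing
--     # subsequence ending at position i (same values A computes via patience sorting).
--     dp = []
--     for x in l:
--         best = 0
--         for y, d in zip(l, dp):
--             if y < x and d > best:
--                 best = d
--         dp.append(best + 1)
--     return dp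
-- ===== Notes on version B (the rewrite author's own statement) =====
-- stated objective: alternative
-- what changed: Replaces A's patience-sorting approach (a sorted tail array maintained with bisect_left) by the textbook quadratic dynamic program: for each element, scan the already-computed prefix for the best strictly smaller predecessor.
import Mathlib
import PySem

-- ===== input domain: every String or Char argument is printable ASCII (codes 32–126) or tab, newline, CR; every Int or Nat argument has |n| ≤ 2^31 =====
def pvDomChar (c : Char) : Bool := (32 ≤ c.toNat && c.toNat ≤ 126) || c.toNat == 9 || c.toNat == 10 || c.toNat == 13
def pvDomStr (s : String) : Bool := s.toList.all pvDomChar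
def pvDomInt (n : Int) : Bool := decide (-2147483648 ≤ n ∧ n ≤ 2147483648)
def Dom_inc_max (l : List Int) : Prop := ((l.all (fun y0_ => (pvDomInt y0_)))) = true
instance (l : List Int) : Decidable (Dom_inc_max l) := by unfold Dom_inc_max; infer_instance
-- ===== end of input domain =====

-- B replaces A's patience-sorting tail array with the textbook quadratic DP for
-- per-position strictly-increasing-subsequence lengths (objective: alternative, not faster).

-- ===== PORT A =====
-- one iteration of A's for-loop; state = (arr, dp), i the Python loop index.
-- arr[-1] is ported with default 0: arr is nonempty on every iteration, so the default is never used;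
-- bisect.bisect_left is the PySem library port of Python's bisect.bisect_left.
def incStepA (l : List Int) (st : List Int × List Int) (i : Int) : List Int × List Int :=
  let arr := st.1
  let dp := st.2
  let li := PySem.List.pyGetD l i 0          -- l[i]; i ∈ range(1, len(l)) is always in range
  if li > PySem.List.pyGetD arr (-1) 0 then  -- l[i] > arr[-1]
    let arr2 := arr ++ [li]                  -- arr.append(l[i])
    (arr2, PySem.List.pySetD dp i (arr2.length : Int))          -- dp[i] = len(arr)
  else
    let pos := PySem.List.bisectLeft arr li  -- pos = bisect.bisect_left(arr, l[i])
    (PySem.List.pySetD arr (pos : Int) li,   -- arr[pos] = l[i]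
     PySem.List.pySetD dp i ((pos : Int) + 1))                  -- dp[i] = pos + 1
def inc_max (l : List Int) : List Int :=
  match l with
  | [] => []                                 -- Python raises IndexError at l[0]; excluded by Pre_
  | x0 :: _ =>
    ((PySem.List.pyRange 1 (l.length : Int) 1).foldl (incStepA l)
      ([x0], List.replicate l.length 1)).2

-- ===== PORT B =====
-- inner loop of Source B: best = 0; for y, d in zip(l, dp): if y < x and d > best: best = d
def bestB (l dp : List Int) (x : Int) : Int :=
  (l.zip dp).foldl (fun b yd => if yd.1 < x ∧ yd.2 > b then yd.2 else b) 0
def inc_max_alt (l : List Int) : List Int :=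
  l.foldl (fun dp x => dp ++ [bestB l dp x + 1]) []

-- ===== PRECONDITION & SPEC =====
-- Pre_ excludes only the empty list, on which A raises IndexError (l[0]).
def Pre_inc_max (l : List Int) : Prop := l ≠ []
instance (l : List Int) : Decidable (Pre_inc_max l) := by unfold Pre_inc_max; infer_instance
def pvWitness_inc_max : List Int := [3, 1, 2, 2, 5]

def Spec_inc_max (l : List Int) (out : List Int) : Prop := out = inc_max_alt l
instance (l : List Int) (out : List Int) : Decidable (Spec_inc_max l out) := by unfold Spec_inc_max; infer_instance

-- ===== CLAIM (what is proved, stated in full; the proofs are below) =====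
def Claim_equal_inc_max : Prop := ∀ (l : List Int), Dom_inc_max l → Pre_inc_max l → Spec_inc_max l (inc_max l)

-- ===== LEMMAS AND PROOFS =====

-- B's dp table after processing the first k elements of l.
def dpTab (l : List Int) : Nat → List Int
  | 0 => []
  | k+1 => dpTab l k ++ [bestB l (dpTab l k) (l.getD k 0) + 1]

lemma dpTab_length (l : List Int) (k : Nat) : (dpTab l k).length = k := by
  induction k with
  | zero => rfl
  | succ k ih => simp [dpTab, ih]

-- characterization of B's inner fold
lemma bfold_spec (x : Int) (ps : List (Int × Int)) (b0 : Int) :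
    b0 ≤ ps.foldl (fun b yd => if yd.1 < x ∧ yd.2 > b then yd.2 else b) b0
    ∧ (∀ p ∈ ps, p.1 < x → p.2 ≤ ps.foldl (fun b yd => if yd.1 < x ∧ yd.2 > b then yd.2 else b) b0)
    ∧ (ps.foldl (fun b yd => if yd.1 < x ∧ yd.2 > b then yd.2 else b) b0 = b0
       ∨ ∃ p ∈ ps, p.1 < x ∧ p.2 = ps.foldl (fun b yd => if yd.1 < x ∧ yd.2 > b then yd.2 else b) b0) := by
  induction ps generalizing b0 with
  | nil => simp
  | cons p ps ih =>
    simp only [List.foldl_cons]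
    by_cases hc : p.1 < x ∧ p.2 > b0
    · rw [if_pos hc]
      obtain ⟨h1, h2, h3⟩ := ih p.2
      refine ⟨le_trans (le_of_lt hc.2) h1, ?_, ?_⟩
      · intro q hq hqx
        rcases List.mem_cons.mp hq with hq | hq
        · subst hq; exact h1
        · exact h2 q hq hqx
      · rcases h3 with h3 | ⟨q, hq, hqx, hqe⟩
        · exact Or.inr ⟨p, by simp, hc.1, h3.symm⟩
        · exact Or.inr ⟨q, by simp [hq], hqx, hqe⟩
    · rw [if_neg hc]
      obtain ⟨h1, h2, h3⟩ := ih b0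
      refine ⟨h1, ?_, ?_⟩
      · intro q hq hqx
        rcases List.mem_cons.mp hq with hq | hq
        · subst hq
          by_cases hb : q.2 > b0
          · exact absurd ⟨hqx, hb⟩ hc
          · exact le_trans (not_lt.mp hb) h1
        · exact h2 q hq hqx
      · rcases h3 with h3 | ⟨q, hq, hqx, hqe⟩
        · exact Or.inl h3
        · exact Or.inr ⟨q, by simp [hq], hqx, hqe⟩

lemma bestB_nonneg (l dp : List Int) (x : Int) : 0 ≤ bestB l dp x :=
  (bfold_spec x (l.zip dp) 0).1

lemma dpTab_pos (l : List Int) (k : Nat) : ∀ j, j < k → 1 ≤ (dpTab l k).getD j 0 := by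
  induction k with
  | zero => intro j hj; omega
  | succ k ih =>
    intro j hj
    rcases Nat.lt_or_ge j k with h | h
    · rw [show dpTab l (k+1) = dpTab l k ++ [bestB l (dpTab l k) (l.getD k 0) + 1] from rfl,
        List.getD_append _ _ _ _ (by rw [dpTab_length]; exact h)]
      exact ih j h
    · have hjk : j = k := by omega
      subst hjk
      rw [show dpTab l (j+1) = dpTab l j ++ [bestB l (dpTab l j) (l.getD j 0) + 1] from rfl,
        List.getD_append_right _ _ _ _ (by rw [dpTab_length])]
      simp only [dpTab_length, Nat.sub_self, List.getD_cons_zero]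
      have := bestB_nonneg l (dpTab l j) (l.getD j 0)
      omega

lemma foldl_dpTab (l : List Int) : ∀ (s : List Int) (k : Nat), l.drop k = s →
    s.foldl (fun dp x => dp ++ [bestB l dp x + 1]) (dpTab l k) = dpTab l (k + s.length) := by
  intro s
  induction s with
  | nil => intro k _; simp
  | cons x s ih =>
    intro k hk
    have hx : l[k]? = some x := by
      have : (List.drop k l)[0]? = l[k + 0]? := List.getElem?_drop
      rw [hk] at this
      simpa using this.symm
    have hgd : l.getD k 0 = x := by simp [List.getD, hx]
    have hdrop : l.drop (k+1) = s := by
      have : List.drop 1 (List.drop k l) = List.drop (k + 1) l := List.drop_drop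
      rw [hk] at this
      simpa using this.symm
    simp only [List.foldl_cons]
    have hstep : dpTab l k ++ [bestB l (dpTab l k) x + 1] = dpTab l (k+1) := by
      rw [show dpTab l (k+1) = dpTab l k ++ [bestB l (dpTab l k) (l.getD k 0) + 1] from rfl, hgd]
    rw [hstep, ih (k+1) hdrop]
    congr 1
    simp
    omega

-- inc_max_alt computes dpTab
lemma alt_eq_dpTab (l : List Int) : inc_max_alt l = dpTab l l.length := by
  have := foldl_dpTab l l 0 (by simp)
  simpa [inc_max_alt] using this

-- A's state after the loop iterations i = 1 .. k.
def aState (l : List Int) (x0 : Int) : Nat → List Int × List Int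
  | 0 => ([x0], List.replicate l.length 1)
  | k+1 => incStepA l (aState l x0 k) ((k : Int) + 1)

lemma foldl_aState (l : List Int) (x0 : Int) (k : Nat) :
    (PySem.List.pyRange 1 ((k : Int) + 1) 1).foldl (incStepA l) ([x0], List.replicate l.length 1)
      = aState l x0 k := by
  induction k with
  | zero => rw [PySem.List.pyRange_one_eq_nil (by norm_num)]; rfl
  | succ k ih =>
    have h : ((k + 1 : Nat) : Int) + 1 = ((k : Int) + 1) + 1 := by push_cast; ring
    rw [h, PySem.List.pyRange_one_succ_right (by omega), List.foldl_append, ih]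
    rfl

lemma incA_eq_aState (x0 : Int) (rest : List Int) :
    inc_max (x0 :: rest) = (aState (x0 :: rest) x0 rest.length).2 := by
  show ((PySem.List.pyRange 1 ((x0 :: rest).length : Int) 1).foldl (incStepA (x0 :: rest))
      ([x0], List.replicate (x0 :: rest).length 1)).2 = _
  rw [show ((x0 :: rest).length : Int) = ((rest.length : Int) + 1) by simp,
    foldl_aState (x0 :: rest) x0 rest.length]

lemma getD_eq_getElem' (l : List Int) {j : Nat} (h : j < l.length) : l.getD j 0 = l[j] :=
  List.getD_eq_getElem l 0 h

lemma sorted_getD_lt (arr : List Int) (h : arr.Pairwise (· < ·)) {i j : Nat}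
    (hij : i < j) (hj : j < arr.length) : arr.getD i 0 < arr.getD j 0 := by
  rw [getD_eq_getElem' arr (lt_trans hij hj), getD_eq_getElem' arr hj]
  exact List.pairwise_iff_getElem.mp h i j (lt_trans hij hj) hj hij

lemma sorted_getD_le (arr : List Int) (h : arr.Pairwise (· < ·)) {i j : Nat}
    (hij : i ≤ j) (hj : j < arr.length) : arr.getD i 0 ≤ arr.getD j 0 := by
  rcases Nat.lt_or_ge i j with h' | h'
  · exact le_of_lt (sorted_getD_lt arr h h' hj)
  · have : i = j := by omega
    simp [this]

-- the main characterization: under the invariant facts, bestB counts the arr entries below x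
lemma bestB_eq_count (l d arr : List Int) (x : Int)
    (hdlen : d.length ≤ l.length)
    (hsort : arr.Pairwise (· < ·))
    (hI2 : ∀ m, m < arr.length → ∃ j, j < d.length ∧ d.getD j 0 = (m : Int) + 1
        ∧ l.getD j 0 = arr.getD m 0)
    (hI3 : ∀ j, j < d.length → d.getD j 0 ≤ (arr.length : Int)
        ∧ arr.getD (d.getD j 0 - 1).toNat 0 ≤ l.getD j 0) :
    bestB l d x ≤ (arr.length : Int)
    ∧ (∀ t, t < arr.length → (arr.getD t 0 < x ↔ (t : Int) + 1 ≤ bestB l d x)) := by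
  obtain ⟨hb0, hub, hmem⟩ := bfold_spec x (l.zip d) 0
  have hidx : ∀ p ∈ l.zip d, ∃ j, j < d.length ∧ l.getD j 0 = p.1 ∧ d.getD j 0 = p.2 := by
    intro p hp
    obtain ⟨i, hi, he⟩ := List.mem_iff_getElem.mp hp
    have hiz : i < d.length := by
      have := List.length_zip (l₁ := l) (l₂ := d)
      omega
    have hil : i < l.length := lt_of_lt_of_le hiz hdlen
    refine ⟨i, hiz, ?_, ?_⟩
    · rw [getD_eq_getElem' l hil]
      have : (l.zip d)[i] = (l[i], d[i]) := List.getElem_zip (h := hi)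
      rw [this] at he
      exact congrArg Prod.fst he
    · rw [getD_eq_getElem' d hiz]
      have : (l.zip d)[i] = (l[i], d[i]) := List.getElem_zip (h := hi)
      rw [this] at he
      exact congrArg Prod.snd he
  have hle : bestB l d x ≤ (arr.length : Int) := by
    rcases hmem with h0 | ⟨p, hp, _, hpe⟩
    · rw [show bestB l d x = (l.zip d).foldl (fun b yd => if yd.1 < x ∧ yd.2 > b then yd.2 else b) 0 from rfl, h0]
      positivity
    · obtain ⟨j, hj, _, hjd⟩ := hidx p hp
      have := (hI3 j hj).1
      rw [hjd, hpe] at this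
      exact this
  refine ⟨hle, fun t ht => ⟨fun hlt => ?_, fun hge => ?_⟩⟩
  · obtain ⟨j, hj, hjd, hjl⟩ := hI2 t ht
    have hjl' : j < l.length := lt_of_lt_of_le hj hdlen
    have hpz : (l[j], d[j]) ∈ l.zip d := by
      have hjz : j < (l.zip d).length := by
        have := List.length_zip (l₁ := l) (l₂ := d)
        omega
      have : (l.zip d)[j] = (l[j], d[j]) := List.getElem_zip (h := hjz)
      rw [← this]
      exact List.getElem_mem hjz
    have := hub (l[j], d[j]) hpz (by rw [← getD_eq_getElem' l hjl', hjl]; exact hlt)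
    rw [← getD_eq_getElem' d hj, hjd] at this
    exact this
  · have hpos : 1 ≤ bestB l d x := by
      have : (0 : Int) ≤ t := Int.natCast_nonneg t
      omega
    rcases hmem with h0 | ⟨p, hp, hpx, hpe⟩
    · rw [show bestB l d x = (l.zip d).foldl (fun b yd => if yd.1 < x ∧ yd.2 > b then yd.2 else b) 0 from rfl, h0] at hpos
      omega
    · obtain ⟨j, hj, hjl, hjd⟩ := hidx p hp
      have h3 := (hI3 j hj).2
      rw [hjd, hpe] at h3
      have harm : arr.getD (bestB l d x - 1).toNat 0 < x := by
        rw [hjl] at h3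
        exact lt_of_le_of_lt h3 hpx
      have htn : t ≤ (bestB l d x - 1).toNat := by omega
      have hbn : (bestB l d x - 1).toNat < arr.length := by omega
      exact lt_of_le_of_lt (sorted_getD_le arr hsort htn hbn) harm

-- setting the first slot after a prefix
lemma set_append_rep (d : List Int) (c : Nat) (hc : 1 ≤ c) (v : Int) :
    (d ++ List.replicate c (1 : Int)).set d.length v = (d ++ [v]) ++ List.replicate (c-1) 1 := by
  induction d with
  | nil =>
    cases c with
    | zero => omega
    | succ c => simp [List.replicate_succ]
  | cons a d ih => simp [ih]

lemma getD_set_lt (arr : List Int) (i j : Nat) (v : Int) (hj : j < arr.length) :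
    (arr.set i v).getD j 0 = if i = j then v else arr.getD j 0 := by
  rw [getD_eq_getElem' _ (by simpa using hj), List.getElem_set]
  split
  · rfl
  · exact (getD_eq_getElem' arr hj).symm

-- the loop invariant tying A's state to B's table
def LoopInv (l : List Int) (x0 : Int) (k : Nat) : Prop :=
  (aState l x0 k).2 = dpTab l (k+1) ++ List.replicate (l.length - (k+1)) 1
  ∧ (aState l x0 k).1 ≠ []
  ∧ (aState l x0 k).1.Pairwise (· < ·)
  ∧ (∀ m, m < (aState l x0 k).1.length →
      ∃ j, j ≤ k ∧ (dpTab l (k+1)).getD j 0 = (m : Int) + 1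
        ∧ l.getD j 0 = (aState l x0 k).1.getD m 0)
  ∧ (∀ j, j ≤ k →
      (dpTab l (k+1)).getD j 0 ≤ ((aState l x0 k).1.length : Int)
      ∧ (aState l x0 k).1.getD ((dpTab l (k+1)).getD j 0 - 1).toNat 0 ≤ l.getD j 0)

lemma inv_holds (l : List Int) (x0 : Int) (hx0 : l.getD 0 0 = x0) :
    ∀ k, k + 1 ≤ l.length → LoopInv l x0 k := by
  intro k
  induction k with
  | zero =>
    intro hk
    have hd1 : dpTab l 1 = [1] := by simp [dpTab, bestB]
    refine ⟨?_, by simp [aState], by simp [aState], ?_, ?_⟩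
    · show List.replicate l.length 1 = dpTab l 1 ++ List.replicate (l.length - 1) 1
      rw [hd1]
      cases hn : l.length with
      | zero => omega
      | succ nm => simp [List.replicate_succ]
    · intro m hm
      have hm0 : m = 0 := by simpa [aState] using hm
      subst hm0
      exact ⟨0, le_refl 0, by rw [hd1]; norm_num, by simp [aState]; exact hx0⟩
    · intro j hj
      have hj0 : j = 0 := Nat.le_zero.mp hj
      subst hj0
      rw [hd1]
      exact ⟨by simp [aState], by simp [aState]; exact le_of_eq hx0.symm⟩
  | succ k ih =>
    intro hk
    obtain ⟨hdp, hne, hsort, hI2, hI3⟩ := ih (by omega)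
    set A := aState l x0 k with hA
    set arr := A.1 with harr
    set d := dpTab l (k+1) with hd
    have hdlen : d.length = k + 1 := dpTab_length l (k+1)
    set x := l.getD (k+1) 0 with hx
    set m := bestB l d x with hm
    have hm0 : (0 : Int) ≤ m := bestB_nonneg l d x
    have hal : 1 ≤ arr.length := List.length_pos_of_ne_nil hne
    have hI2' : ∀ mm, mm < arr.length → ∃ j, j < d.length ∧ d.getD j 0 = (mm : Int) + 1
        ∧ l.getD j 0 = arr.getD mm 0 := by
      intro mm hmm
      obtain ⟨j, hj, h1, h2⟩ := hI2 mm hmm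
      exact ⟨j, by omega, h1, h2⟩
    have hI3' : ∀ j, j < d.length → d.getD j 0 ≤ (arr.length : Int)
        ∧ arr.getD (d.getD j 0 - 1).toNat 0 ≤ l.getD j 0 := by
      intro j hj
      exact hI3 j (by omega)
    obtain ⟨hmle, hiff⟩ := bestB_eq_count l d arr x (by omega) hsort hI2' hI3'
    have hdpos : ∀ j, j ≤ k → 1 ≤ d.getD j 0 := fun j hj => dpTab_pos l (k+1) j (by omega)
    have hd2 : dpTab l (k+1+1) = d ++ [m + 1] := rfl
    have hli : PySem.List.pyGetD l ((k : Int) + 1) 0 = x := by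
      rw [show ((k : Int) + 1) = ((k + 1 : Nat) : Int) by push_cast; ring,
        PySem.List.pyGetD_natCast]
    have hlast : PySem.List.pyGetD arr (-1) 0 = arr.getD (arr.length - 1) 0 := by
      rw [PySem.List.pyGetD_neg_one arr 0 hne, List.getLast_eq_getElem,
        getD_eq_getElem' arr (by omega)]
    have hsetdp : ∀ v : Int, PySem.List.pySetD A.2 ((k : Int) + 1) v
        = (d ++ [v]) ++ List.replicate (l.length - (k + 1 + 1)) 1 := by
      intro v
      rw [show ((k : Int) + 1) = ((k + 1 : Nat) : Int) by push_cast; ring,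
        PySem.List.pySetD_natCast, hdp, show k + 1 = d.length from hdlen.symm,
        set_append_rep d _ (by rw [hdlen]; omega) v]
      have hcnt : l.length - d.length - 1 = l.length - (d.length + 1) := by omega
      rw [hcnt]
    by_cases hcond : arr.getD (arr.length - 1) 0 < x
    · -- append branch: l[i] > arr[-1]
      have hmlen : m = (arr.length : Int) := by
        have h1 := (hiff (arr.length - 1) (by omega)).mp hcond
        omega
      have hstep : aState l x0 (k+1)
          = (arr ++ [x], (d ++ [((arr ++ [x]).length : Int)]) ++ List.replicate (l.length - (k + 1 + 1)) 1) := by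
        show incStepA l A ((k : Int) + 1) = _
        rw [incStepA, hli, hlast, if_pos hcond]
        simp only [hsetdp]
        rfl
      have hv : ((arr ++ [x]).length : Int) = m + 1 := by
        simp [hmlen]
      constructor
      · rw [hstep, hd2, hv]
      refine ⟨by simp [hstep], ?_, ?_, ?_⟩
      · -- sorted
        rw [hstep]
        refine List.pairwise_append.mpr ⟨hsort, by simp, ?_⟩
        intro a ha b hb
        have hb' : b = x := by simpa using hb
        obtain ⟨t, ht, hte⟩ := List.mem_iff_getElem.mp ha
        subst hb'
        rw [← hte, ← getD_eq_getElem' arr ht]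
        exact lt_of_le_of_lt (sorted_getD_le arr hsort (by omega) (by omega)) hcond
      · -- I2
        intro mm hmm
        rw [hstep] at hmm ⊢
        simp only [List.length_append, List.length_cons, List.length_nil] at hmm
        rcases Nat.lt_or_ge mm arr.length with h' | h'
        · obtain ⟨j, hj, h1, h2⟩ := hI2 mm h'
          refine ⟨j, by omega, ?_, ?_⟩
          · rw [hd2, List.getD_append d [m+1] 0 j (by omega), h1]
          · rw [List.getD_append arr [x] 0 mm h', h2]
        · have hmm' : mm = arr.length := by omega
          subst hmm'
          refine ⟨k + 1, le_refl _, ?_, ?_⟩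
          · rw [hd2, List.getD_append_right d [m+1] 0 (k+1) (by omega), hdlen]
            simp only [Nat.sub_self, List.getD_cons_zero]
            omega
          · rw [List.getD_append_right arr [x] 0 arr.length (le_refl _)]
            simp only [Nat.sub_self, List.getD_cons_zero]
            exact hx.symm
      · -- I3
        intro j hj
        rw [hstep]
        simp only [List.length_append, List.length_cons, List.length_nil]
        rcases Nat.lt_or_ge j (k+1) with h' | h'
        · obtain ⟨ha1, ha2⟩ := hI3 j (by omega)
          have hjd : 1 ≤ d.getD j 0 := hdpos j (by omega)
          refine ⟨?_, ?_⟩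
          · rw [hd2, List.getD_append d [m+1] 0 j (by omega)]
            push_cast
            omega
          · rw [hd2, List.getD_append d [m+1] 0 j (by omega),
              List.getD_append arr [x] 0 ((d.getD j 0 - 1).toNat) (by omega)]
            exact ha2
        · have hj' : j = k + 1 := by omega
          subst hj'
          rw [hd2, List.getD_append_right d [m+1] 0 (k+1) (by omega), hdlen]
          simp only [Nat.sub_self, List.getD_cons_zero]
          refine ⟨by push_cast; omega, ?_⟩
          rw [show (m + 1 - 1).toNat = arr.length by omega,
            List.getD_append_right arr [x] 0 arr.length (le_refl _)]
          simp only [Nat.sub_self, List.getD_cons_zero]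
          exact le_of_eq hx
    · -- replace branch: arr[pos] = l[i]
      rw [not_lt] at hcond
      have hmlt : m < (arr.length : Int) := by
        have hc : ¬ ((arr.length : Int) ≤ m) := by
          intro hge
          have := (hiff (arr.length - 1) (by omega)).mpr (by omega)
          omega
        omega
      set pos := PySem.List.bisectLeft arr x with hposdef
      obtain ⟨hp1, hp2, hp3⟩ := PySem.List.bisectLeft_spec arr x (hsort.imp le_of_lt)
      have hpos_eq : (pos : Int) = m := by
        have h1 : (pos : Int) ≤ m := by
          rcases Nat.eq_zero_or_pos pos with h0 | h0
          · rw [h0]; exact_mod_cast hm0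
          · have hg := hp2 (pos - 1) (by omega) (by omega)
            rw [← getD_eq_getElem' arr (by omega)] at hg
            have := (hiff (pos - 1) (by omega)).mp hg
            omega
        have h2 : m ≤ (pos : Int) := by
          rcases (by omega : m ≤ 0 ∨ 0 < m) with hm1 | hm1
          · omega
          · have htlen : (m - 1).toNat < arr.length := by omega
            have hax := (hiff (m - 1).toNat htlen).mpr (by omega)
            by_contra hcon
            have hle : pos ≤ (m - 1).toNat := by omega
            have := hp3 (m - 1).toNat htlen hle
            rw [← getD_eq_getElem' arr htlen] at this
            omega
        omega
      have hposlt : pos < arr.length := by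
        have hplt : (pos : Int) < (arr.length : Int) := by rw [hpos_eq]; exact hmlt
        exact_mod_cast hplt
      have hxle : x ≤ arr.getD pos 0 := by
        have := hp3 pos hposlt (le_refl _)
        rw [← getD_eq_getElem' arr hposlt] at this
        exact this
      have hstep : aState l x0 (k+1)
          = (arr.set pos x, (d ++ [(pos : Int) + 1]) ++ List.replicate (l.length - (k + 1 + 1)) 1) := by
        show incStepA l A ((k : Int) + 1) = _
        rw [incStepA, hli, hlast, if_neg (not_lt.mpr hcond)]
        simp only [hsetdp, PySem.List.pySetD_natCast]
        rfl
      have harrlt : ∀ t, t < arr.length → (arr.set pos x).getD t 0 ≤ arr.getD t 0 := by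
        intro t ht
        rw [getD_set_lt arr pos t x ht]
        split
        · next h => rw [← h]; exact hxle
        · exact le_refl _
      constructor
      · rw [hstep, hd2, hpos_eq]
      refine ⟨?_, ?_, ?_, ?_⟩
      · rw [hstep]
        intro hcontra
        have hlc := congrArg List.length hcontra
        simp only [List.length_set, List.length_nil] at hlc
        omega
      · -- sorted
        rw [hstep]
        refine List.pairwise_iff_getElem.mpr ?_
        intro i j hi hj hij
        simp only [List.length_set] at hi hj
        rw [List.getElem_set, List.getElem_set]
        by_cases hip : pos = i
        · rw [if_pos hip, if_neg (by omega)]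
          subst hip
          calc x ≤ arr[pos] := by rw [← getD_eq_getElem' arr hposlt]; exact hxle
            _ < arr[j] := List.pairwise_iff_getElem.mp hsort pos j hi hj hij
        · rw [if_neg hip]
          by_cases hjp : pos = j
          · rw [if_pos hjp]
            exact hp2 i hi (by omega)
          · rw [if_neg hjp]
            exact List.pairwise_iff_getElem.mp hsort i j hi hj hij
      · -- I2
        intro mm hmm
        rw [hstep] at hmm ⊢
        simp only [List.length_set] at hmm
        by_cases hmp : mm = pos
        · subst hmp
          refine ⟨k + 1, le_refl _, ?_, ?_⟩
          · rw [hd2, List.getD_append_right d [m+1] 0 (k+1) (by omega), hdlen]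
            simp only [Nat.sub_self, List.getD_cons_zero]
            rw [hpos_eq]
          · rw [getD_set_lt arr pos pos x hmm, if_pos rfl]
        · obtain ⟨j, hj, h1, h2⟩ := hI2 mm hmm
          refine ⟨j, by omega, ?_, ?_⟩
          · rw [hd2, List.getD_append d [m+1] 0 j (by omega), h1]
          · rw [getD_set_lt arr pos mm x hmm, if_neg (fun h => hmp h.symm), h2]
      · -- I3
        intro j hj
        rw [hstep]
        simp only [List.length_set]
        rcases Nat.lt_or_ge j (k+1) with h' | h'
        · obtain ⟨ha1, ha2⟩ := hI3 j (by omega)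
          have hjd : 1 ≤ d.getD j 0 := hdpos j (by omega)
          refine ⟨by rw [hd2, List.getD_append d [m+1] 0 j (by omega)]; exact ha1, ?_⟩
          rw [hd2, List.getD_append d [m+1] 0 j (by omega)]
          exact le_trans (harrlt _ (by omega)) ha2
        · have hj' : j = k + 1 := by omega
          subst hj'
          rw [hd2, List.getD_append_right d [m+1] 0 (k+1) (by omega), hdlen]
          simp only [Nat.sub_self, List.getD_cons_zero]
          refine ⟨by omega, ?_⟩
          rw [show (m + 1 - 1).toNat = pos by omega,
            getD_set_lt arr pos pos x hposlt, if_pos rfl]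

-- ===== VERDICT (by name: the statement is the Claim_ definition above) =====
theorem inc_max_spec : Claim_equal_inc_max := by
  intro l _ hpre
  unfold Spec_inc_max
  match l with
  | [] => exact absurd rfl hpre
  | x0 :: rest =>
    have hinv := inv_holds (x0 :: rest) x0 rfl rest.length (Nat.le_refl _)
    have h1 := hinv.1
    rw [incA_eq_aState, alt_eq_dpTab]
    simp only [List.length_cons] at h1 ⊢
    rw [h1]
    simp
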